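-- pv_equiv track=rewrite | github.com/bhatnagaranshika02/Competitive-Programming | Codechef/June-Long-Challenge-2020/ChefAndProceControl.py | PriceControl
-- ===== SOURCE A (Python) =====
-- def PriceControl(l,k):
--     summ=sum(l)
--     sum2=0
--     for i in range(len(l)):
--         if l[i] <k:
--             sum2+=l[i]
--         else:
--             sum2+=k
--     return abs(summ-sum2)
-- ===== SOURCE B (Python) =====
-- def PriceControl(l, k):
--     excess = 0
--     for x in l:
--         if x > k:
--             excess += x - k
--     return excess
-- ===== Notes on version B (the rewrite author's own statement) =====
-- stated objective: simpler
-- what changed: B accumulates the per-element excess max(0, x-k) directly in one pass, never forming the grand total, the capped sum, or the abs.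
import Mathlib
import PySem

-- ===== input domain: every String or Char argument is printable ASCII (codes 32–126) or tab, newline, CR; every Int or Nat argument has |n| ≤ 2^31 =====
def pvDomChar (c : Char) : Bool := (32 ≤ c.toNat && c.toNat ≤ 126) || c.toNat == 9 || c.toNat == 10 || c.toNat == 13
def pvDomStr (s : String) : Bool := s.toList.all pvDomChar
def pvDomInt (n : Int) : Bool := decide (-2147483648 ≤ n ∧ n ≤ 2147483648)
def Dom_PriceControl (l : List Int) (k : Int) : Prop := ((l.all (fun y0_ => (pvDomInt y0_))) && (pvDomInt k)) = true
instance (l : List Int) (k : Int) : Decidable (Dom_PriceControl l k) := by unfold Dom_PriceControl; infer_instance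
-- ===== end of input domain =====

-- B replaces A's grand-total-minus-capped-sum-then-abs scheme by one pass accumulating the excess x - k for x > k (simpler, no abs needed).

-- ===== PORT A =====
def PriceControl (l : List Int) (k : Int) : Int :=
  let summ := l.foldl (· + ·) 0
  let sum2 := (PySem.List.pyRange 0 l.length 1).foldl
      (fun sum2 i =>
        if PySem.List.pyGetD l i 0 < k then sum2 + PySem.List.pyGetD l i 0
        else sum2 + k) 0
  (summ - sum2).natAbs

-- ===== PORT B =====
def PriceControl_alt (l : List Int) (k : Int) : Int :=
  l.foldl (fun excess x => if x > k then excess + (x - k) else excess) 0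

-- ===== PRECONDITION & SPEC =====
def Spec_PriceControl (l : List Int) (k : Int) (out : Int) : Prop := out = PriceControl_alt l k
instance (l : List Int) (k : Int) (out : Int) : Decidable (Spec_PriceControl l k out) := by unfold Spec_PriceControl; infer_instance

-- ===== CLAIM (what is proved, stated in full; the proofs are below) =====
def Claim_equal_PriceControl : Prop := ∀ (l : List Int) (k : Int), Dom_PriceControl l k → Spec_PriceControl l k (PriceControl l k)

-- ===== LEMMAS AND PROOFS =====

-- A's index loop is a fold over the list itself
theorem priceA_loop (l : List Int) (k : Int) :
    (PySem.List.pyRange 0 l.length 1).foldl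
      (fun sum2 i =>
        if PySem.List.pyGetD l i 0 < k then sum2 + PySem.List.pyGetD l i 0
        else sum2 + k) 0
    = l.foldl (fun sum2 x => if x < k then sum2 + x else sum2 + k) 0 := by
  exact PySem.List.foldl_pyRange_zero_pyGetD l 0 (fun sum2 x => if x < k then sum2 + x else sum2 + k) 0

-- generalized accumulator invariant: sum minus capped-sum equals accumulated excess
theorem price_key (l : List Int) (k : Int) (a b c : Int) (h : a - b = c) :
    l.foldl (· + ·) a - l.foldl (fun s x => if x < k then s + x else s + k) b
    = l.foldl (fun e x => if x > k then e + (x - k) else e) c := by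
  induction l generalizing a b c with
  | nil => simpa using h
  | cons x xs ih =>
    simp only [List.foldl_cons]
    apply ih
    by_cases hx : x < k
    · simp [hx, show ¬ (x > k) from by omega]; omega
    · by_cases hx2 : x > k <;> simp [hx, hx2] <;> omega

theorem price_nonneg (l : List Int) (k : Int) (c : Int) (hc : 0 ≤ c) :
    0 ≤ l.foldl (fun e x => if x > k then e + (x - k) else e) c := by
  induction l generalizing c with
  | nil => simpa using hc
  | cons x xs ih =>
    simp only [List.foldl_cons]
    apply ih
    split <;> omega

-- ===== VERDICT (by name: the statement is the Claim_ definition above) =====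
theorem PriceControl_spec : Claim_equal_PriceControl := by
  intro l k _
  unfold Spec_PriceControl PriceControl PriceControl_alt
  simp only [priceA_loop]
  have h := price_key l k 0 0 0 (by ring)
  have := price_nonneg l k 0 le_rfl
  omega
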